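-- pv_equiv track=rewrite | github.com/PanJianTing/LeetCode | 2802_FindTheK-thLuckyNumber.py | kthLuckyNumber
-- ===== SOURCE A (Python) =====
-- def kthLuckyNumber(k: int) -> str:
--     k = k+1
--     bit_list = []
--
--     while k > 0:
--         bit_list.append(k%2)
--         k >>= 1
--
--     bit_list.pop()
--     res = ""
--
--     for i in range(len(bit_list)-1, -1, -1):
--         if bit_list[i]:
--             res += '7'
--         else:
--             res += '4'
--     return res
-- ===== SOURCE B (Python) =====
-- def kthLuckyNumber(k: int) -> str:
--     # Combinatorial ranking: there are 2**L lucky strings of length L, the first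
--     # of them at overall index 2**L - 1.  Find the length L of the answer, take
--     # the rank r of k within that length block, then decode the digits front to
--     # back: at each position half of the remaining block starts with '4'.
--     L = 0
--     while k >= 2 ** (L + 1) - 1:
--         L += 1
--     r = k - (2 ** L - 1)
--     block = 2 ** L // 2
--     digits = []
--     for _ in range(L):
--         if r < block:
--             digits.append('4')
--         else:
--             digits.append('7')
--             r -= block
--         block //= 2
--     return ''.join(digits)
-- ===== Notes on version B (the rewrite author's own statement) =====
-- stated objective: alternative
-- what changed: Replaces A's binary expansion of k+1 (LSB-first bit loop, pop of the leading bit, reversal pass) by combinatorial ranking: find the answer's length L by comparing k against the cumulative block sizes 2^(L+1)-1, then decode the rank within the length-L block front to back by halving block comparisons.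
-- outside the precondition, e.g. on kthLuckyNumber(-1): A raises IndexError, B returns ''
import Mathlib
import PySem

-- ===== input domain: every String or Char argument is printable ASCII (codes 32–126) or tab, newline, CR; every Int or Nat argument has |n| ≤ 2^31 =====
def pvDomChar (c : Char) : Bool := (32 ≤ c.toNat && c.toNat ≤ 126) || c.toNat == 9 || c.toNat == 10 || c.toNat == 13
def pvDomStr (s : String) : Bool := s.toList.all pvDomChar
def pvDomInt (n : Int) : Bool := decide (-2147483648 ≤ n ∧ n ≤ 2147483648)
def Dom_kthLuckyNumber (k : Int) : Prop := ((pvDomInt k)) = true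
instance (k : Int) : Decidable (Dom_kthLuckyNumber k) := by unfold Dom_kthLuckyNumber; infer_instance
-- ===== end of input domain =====

-- B replaces A's binary expansion of k+1 (LSB-first bit loop + pop + reversal) by
-- combinatorial ranking: length search over block sizes, then front-to-back rank decoding
-- (objective: alternative; same O(log k) cost).

-- ===== PORT A =====
-- while k > 0: bit_list.append(k % 2); k >>= 1   (k >>= 1 on a positive int is floor division by 2)
def kthALoop (k : Int) (bit_list : List Int) : List Int :=
  if 0 < k then
    kthALoop (PySem.Int.floordiv k 2) (bit_list ++ [PySem.Int.mod k 2])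
  else bit_list
termination_by k.toNat
decreasing_by
  rename_i h
  rw [PySem.Int.floordiv_eq_ediv_of_pos (by omega : (0:Int) < 2)]
  omega

def kthLuckyNumber (k : Int) : String :=
  let k1 := k + 1
  let bit_list := kthALoop k1 []
  match PySem.List.pop? bit_list with
  | none => ""   -- bit_list.pop() raises IndexError here (k < 0); excluded by Pre_
  | some (_, bl) =>
      -- for i in range(len(bl)-1, -1, -1): res += '7' if bl[i] else '4'
      let res := (PySem.List.pyRange ((bl.length : Int) - 1) (-1) (-1)).foldl
        (fun res i => res ++ (if PySem.List.pyGetD bl i 0 ≠ 0 then ['7'] else ['4']))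
        ([] : List Char)
      String.ofList res

-- ===== PORT B =====
-- while k >= 2 ** (L + 1) - 1: L += 1
def findLen (k : Int) (L : Nat) : Nat :=
  if 2 ^ (L + 1) - 1 ≤ k then findLen k (L + 1) else L
termination_by k.toNat + 1 - L
decreasing_by
  rename_i h
  have h2 : (L : Int) + 1 < 2 ^ (L + 1) := by exact_mod_cast Nat.lt_two_pow_self
  omega

-- for _ in range(L): if r < block: '4' else: '7'; r -= block; block //= 2
def decodeRank (r block : Int) (n : Nat) (digits : List Char) : List Char :=
  match n with
  | 0 => digits
  | m + 1 =>
      if r < block then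
        decodeRank r (PySem.Int.floordiv block 2) m (digits ++ ['4'])
      else
        decodeRank (r - block) (PySem.Int.floordiv block 2) m (digits ++ ['7'])

def kthLuckyNumber_alt (k : Int) : String :=
  let L := findLen k 0
  let r := k - (2 ^ L - 1)
  let block := PySem.Int.floordiv (2 ^ L) 2
  String.ofList (decodeRank r block L [])

-- ===== PRECONDITION & SPEC =====
-- Pre_ excludes exactly k < 0, where A's bit_list stays empty and bit_list.pop() raises IndexError.
def Pre_kthLuckyNumber (k : Int) : Prop := 0 ≤ k
instance (k : Int) : Decidable (Pre_kthLuckyNumber k) := by unfold Pre_kthLuckyNumber; infer_instance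
def pvWitness_kthLuckyNumber : Int := (5)

def Spec_kthLuckyNumber (k : Int) (out : String) : Prop := out = kthLuckyNumber_alt k
instance (k : Int) (out : String) : Decidable (Spec_kthLuckyNumber k out) := by unfold Spec_kthLuckyNumber; infer_instance

-- ===== CLAIM =====
def Claim_equal_kthLuckyNumber : Prop := ∀ (k : Int), Dom_kthLuckyNumber k → Pre_kthLuckyNumber k → Spec_kthLuckyNumber k (kthLuckyNumber k)

-- ===== LEMMAS AND PROOFS =====

-- the LSB-first bit list of n (n ≥ 1: all bits; the common reference for both ports)
def lsb (n : Nat) : List Int :=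
  if n = 0 then [] else ((n % 2 : Nat) : Int) :: lsb (n / 2)

-- '7' if the bit is set else '4'
def fCh (b : Int) : Char := if b ≠ 0 then '7' else '4'

-- the common intended value, as a list of characters (MSB-first, leading bit removed)
def lucky (n : Nat) : List Char :=
  if n < 2 then [] else lucky (n / 2) ++ [if n % 2 = 1 then '7' else '4']

theorem kthALoop_append (k : Int) (acc : List Int) :
    kthALoop k acc = acc ++ kthALoop k [] := by
  generalize hm : k.toNat = m
  induction m using Nat.strong_induction_on generalizing k acc with
  | _ m ih =>
    subst hm
    by_cases h : 0 < k
    · have hlt : (PySem.Int.floordiv k 2).toNat < k.toNat := by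
        rw [PySem.Int.floordiv_eq_ediv_of_pos (by omega : (0:Int) < 2)]; omega
      conv_lhs => rw [kthALoop]
      conv_rhs => rw [kthALoop]
      rw [if_pos h, if_pos h, ih _ hlt _ _ rfl,
        ih _ hlt (PySem.Int.floordiv k 2) ([] ++ [PySem.Int.mod k 2]) rfl]
      simp
    · rw [kthALoop, if_neg h, kthALoop, if_neg h]; simp

theorem kthALoop_eq_lsb (n : Nat) : kthALoop (n : Int) [] = lsb n := by
  induction n using Nat.strong_induction_on with
  | _ n ih =>
    by_cases h : n = 0
    · subst h; rw [kthALoop, lsb]; simp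
    · rw [kthALoop, if_pos (by exact_mod_cast Nat.pos_of_ne_zero h), lsb, if_neg h,
        kthALoop_append]
      have e1 : PySem.Int.floordiv (n : Int) 2 = ((n / 2 : Nat) : Int) := by
        rw [PySem.Int.floordiv_eq_ediv_of_pos (by omega : (0:Int) < 2)]; omega
      have e2 : PySem.Int.mod (n : Int) 2 = ((n % 2 : Nat) : Int) := by
        rw [PySem.Int.mod_eq_emod_of_pos (by omega : (0:Int) < 2)]; omega
      rw [e1, e2, ih (n / 2) (Nat.div_lt_self (Nat.pos_of_ne_zero h) (by omega))]
      simp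

theorem lsb_ne_nil {n : Nat} (h : n ≠ 0) : lsb n ≠ [] := by
  rw [lsb, if_neg h]; simp

-- A's reversed, MSB-popped bit list spells out `lucky`
theorem lsb_dropLast_reverse (n : Nat) (h : n ≠ 0) :
    ((lsb n).dropLast).reverse.map fCh = lucky n := by
  induction n using Nat.strong_induction_on with
  | _ n ih =>
    rw [lsb, if_neg h, lucky]
    by_cases h2 : n < 2
    · have : n = 1 := by omega
      subst this
      simp [lsb]
    · rw [if_neg h2,
        List.dropLast_cons_of_ne_nil (lsb_ne_nil (by omega : n / 2 ≠ 0))]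
      simp only [List.reverse_cons, List.map_append]
      rw [ih (n / 2) (Nat.div_lt_self (by omega) (by omega)) (by omega)]
      have hm : n % 2 = 0 ∨ n % 2 = 1 := by omega
      rcases hm with hm | hm <;> simp [hm, fCh]

-- A's count-down building loop appends the reversed bit characters
theorem foldA (xs : List Int) (s : List Char) :
    (PySem.List.pyRange ((xs.length : Int) - 1) (-1) (-1)).foldl
      (fun res i => res ++ (if PySem.List.pyGetD xs i 0 ≠ 0 then ['7'] else ['4'])) s
    = s ++ xs.reverse.map fCh := by
  induction xs using List.reverseRecOn generalizing s with
  | nil => rw [PySem.List.pyRange_neg_one_eq_nil (by simp)]; simp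
  | append_singleton ys y ih =>
    have hlen : ((ys ++ [y]).length : Int) - 1 = (ys.length : Int) := by simp
    rw [hlen, PySem.List.pyRange_neg_one_cons (by omega : (-1 : Int) < (ys.length : Int))]
    simp only [List.foldl_cons]
    have hget : PySem.List.pyGetD (ys ++ [y]) ((ys.length : Int)) 0 = y := by
      rw [show ((ys.length : Int)) = ((ys.length : Nat) : Int) by simp,
        PySem.List.pyGetD_natCast]
      simp [List.getD]
    rw [hget,
      PySem.List.foldl_congr_mem _ _
        (fun res i => res ++ (if PySem.List.pyGetD ys i 0 ≠ 0 then ['7'] else ['4'])) _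
        (by
          intro acc x hx
          rcases PySem.List.mem_pyRange_neg_one.mp hx with ⟨hx1, hx2⟩
          have hxlt : x.toNat < ys.length := by omega
          have hx0 : x = ((x.toNat : Nat) : Int) := by omega
          beta_reduce
          rw [hx0, PySem.List.pyGetD_natCast, PySem.List.pyGetD_natCast]
          have hgd : (ys ++ [y]).getD x.toNat 0 = ys.getD x.toNat 0 := by
            simp [List.getD, List.getElem?_append_left hxlt]
          rw [hgd]),
      ih]
    have hy : (if y ≠ 0 then ['7'] else ['4']) = [fCh y] := by
      unfold fCh; split <;> rfl
    rw [hy]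
    simp

-- the match expression of port A, evaluated for a positive argument
theorem portA_eval (n : Nat) (hn : n ≠ 0) :
    (match PySem.List.pop? (kthALoop (n : Int) []) with
     | none => ""
     | some (_, bl) =>
        String.ofList ((PySem.List.pyRange ((bl.length : Int) - 1) (-1) (-1)).foldl
          (fun res i => res ++ (if PySem.List.pyGetD bl i 0 ≠ 0 then ['7'] else ['4']))
          ([] : List Char)))
    = String.ofList (lucky n) := by
  rw [kthALoop_eq_lsb]
  have hne := lsb_ne_nil hn
  rw [← List.dropLast_append_getLast hne, PySem.List.pop?_last]
  dsimp only
  rw [foldA, List.nil_append, lsb_dropLast_reverse n hn]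

-- peeling `lucky` from the FRONT: the first digit of a length-(L+1) lucky string
theorem lucky_step (L : Nat) : ∀ r : Nat, r < 2 ^ (L + 1) →
    lucky (2 ^ (L + 1) + r)
      = (if r < 2 ^ L then '4' else '7') :: lucky (2 ^ L + r % 2 ^ L) := by
  induction L with
  | zero =>
    intro r hr
    have h : r = 0 ∨ r = 1 := by omega
    rcases h with rfl | rfl <;>
      · norm_num
        rw [lucky]
        norm_num
        rw [lucky]
        norm_num
  | succ L ih =>
    intro r hr
    have hp : 0 < 2 ^ L := Nat.two_pow_pos L
    have e1 : (2 ^ (L + 2) + r) / 2 = 2 ^ (L + 1) + r / 2 := by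
      have : 2 ^ (L + 2) = 2 ^ (L + 1) * 2 := by ring
      omega
    have hn2 : ¬ (2 ^ (L + 2) + r < 2) := by
      have : 4 ≤ 2 ^ (L + 2) := by
        calc 4 = 2 ^ 2 := rfl
        _ ≤ 2 ^ (L + 2) := Nat.pow_le_pow_right (by omega) (by omega)
      omega
    rw [lucky, if_neg hn2, e1]
    have hr2 : r / 2 < 2 ^ (L + 1) := by
      have : 2 ^ (L + 2) = 2 ^ (L + 1) * 2 := by ring
      omega
    rw [ih (r / 2) hr2]
    have hh : (if r / 2 < 2 ^ L then '4' else '7') = (if r < 2 ^ (L + 1) then '4' else '7') := by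
      have h21 : 2 ^ (L + 1) = 2 ^ L * 2 := by ring
      by_cases hc : r < 2 ^ (L + 1)
      · rw [if_pos hc, if_pos (by omega)]
      · rw [if_neg hc, if_neg (by omega)]
    have hs : r % 2 ^ (L + 1) < 2 ^ (L + 1) := Nat.mod_lt _ (Nat.two_pow_pos _)
    have hsn2 : ¬ (2 ^ (L + 1) + r % 2 ^ (L + 1) < 2) := by
      have : 2 ≤ 2 ^ (L + 1) := by
        calc 2 = 2 ^ 1 := rfl
        _ ≤ 2 ^ (L + 1) := Nat.pow_le_pow_right (by omega) (by omega)
      omega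
    have hm1 : r % 2 ^ (L + 1) / 2 = r / 2 % 2 ^ L := by
      have := Nat.mod_mul_right_div_self r 2 (2 ^ L)
      rwa [show 2 * 2 ^ L = 2 ^ (L + 1) by ring] at this
    have hm2 : r % 2 ^ (L + 1) % 2 = r % 2 := by
      exact Nat.mod_mod_of_dvd r ⟨2 ^ L, by ring⟩
    have e2 : (2 ^ (L + 1) + r % 2 ^ (L + 1)) / 2 = 2 ^ L + r / 2 % 2 ^ L := by
      have h21 : 2 ^ (L + 1) = 2 ^ L * 2 := by ring
      omega
    have e3 : (2 ^ (L + 1) + r % 2 ^ (L + 1)) % 2 = (2 ^ (L + 2) + r) % 2 := by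
      have h21 : 2 ^ (L + 1) = 2 ^ L * 2 := by ring
      have h22 : 2 ^ (L + 2) = 2 ^ L * 4 := by ring
      omega
    conv_rhs => rw [lucky, if_neg hsn2, e2, e3]
    rw [hh]
    simp

-- B's decoding loop writes `lucky` after the accumulator
theorem decodeRank_eq (L : Nat) : ∀ (r : Int) (d : List Char), 0 ≤ r → r < 2 ^ L →
    decodeRank r (PySem.Int.floordiv (2 ^ L) 2) L d = d ++ lucky (2 ^ L + r.toNat) := by
  induction L with
  | zero =>
    intro r d h0 h1
    have : r = 0 := by omega
    subst this
    simp [decodeRank, lucky]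
  | succ L ih =>
    intro r d h0 h1
    have hfd : PySem.Int.floordiv ((2 : Int) ^ (L + 1)) 2 = (2 : Int) ^ L := by
      rw [PySem.Int.floordiv_eq_ediv_of_pos (by omega : (0:Int) < 2)]
      have : (2 : Int) ^ (L + 1) = 2 ^ L * 2 := by ring
      rw [this]
      exact Int.mul_ediv_cancel _ (by omega)
    have hpow : ((2 ^ L : Nat) : Int) = (2 : Int) ^ L := by push_cast; ring
    have hpow1 : ((2 ^ (L + 1) : Nat) : Int) = (2 : Int) ^ (L + 1) := by push_cast; ring
    have hrn : r.toNat < 2 ^ (L + 1) := by omega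
    rw [decodeRank, hfd]
    by_cases hc : r < (2 : Int) ^ L
    · rw [if_pos hc, ih r (d ++ ['4']) h0 hc]
      rw [lucky_step L r.toNat hrn]
      have : r.toNat < 2 ^ L := by omega
      rw [if_pos this, Nat.mod_eq_of_lt this]
      simp
    · rw [if_neg hc, ih (r - 2 ^ L) (d ++ ['7']) (by omega) (by
        have : (2 : Int) ^ (L + 1) = 2 ^ L * 2 := by ring
        omega)]
      rw [lucky_step L r.toNat hrn]
      have hge : ¬ (r.toNat < 2 ^ L) := by omega
      rw [if_neg hge]
      have hmod : r.toNat % 2 ^ L = (r - 2 ^ L).toNat := by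
        have h2 : r.toNat < 2 ^ L * 2 := by
          have : (2 : Int) ^ (L + 1) = 2 ^ L * 2 := by ring
          omega
        have h3 : 2 ^ L ≤ r.toNat := by omega
        rw [Nat.mod_eq_sub_mod h3, Nat.mod_eq_of_lt (by omega)]
        omega
      rw [hmod]
      simp

-- the length search lands in the right block
theorem findLen_spec (k : Int) : ∀ L₀ : Nat, (2 : Int) ^ L₀ - 1 ≤ k →
    (2 : Int) ^ (findLen k L₀) - 1 ≤ k ∧ k < 2 ^ (findLen k L₀ + 1) - 1 := by
  intro L₀
  generalize hm : k.toNat + 1 - L₀ = m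
  induction m using Nat.strong_induction_on generalizing L₀ with
  | _ m ih =>
    intro hle
    rw [findLen]
    by_cases hc : (2 : Int) ^ (L₀ + 1) - 1 ≤ k
    · rw [if_pos hc]
      have h2 : ((L₀ : Int)) + 1 < 2 ^ (L₀ + 1) := by exact_mod_cast Nat.lt_two_pow_self
      exact ih (k.toNat + 1 - (L₀ + 1)) (by omega) (L₀ + 1) (by omega) hc
    · rw [if_neg hc]
      exact ⟨hle, by omega⟩

-- ===== VERDICT =====
theorem kthLuckyNumber_spec : Claim_equal_kthLuckyNumber := by
  intro k _ hk
  replace hk : 0 ≤ k := hk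
  have hnz : (k + 1).toNat ≠ 0 := by omega
  have hn : (k + 1 : Int) = ((k + 1).toNat : Int) := by omega
  show kthLuckyNumber k = kthLuckyNumber_alt k
  simp only [kthLuckyNumber, kthLuckyNumber_alt]
  rw [hn]
  have hA := portA_eval _ hnz
  rw [hA]
  have hspec := findLen_spec k 0 (by simpa using hk)
  set L := findLen k 0 with hL
  have hr0 : 0 ≤ k - (2 ^ L - 1) := by omega
  have hr1 : k - (2 ^ L - 1) < 2 ^ L := by
    have : (2 : Int) ^ (L + 1) = 2 ^ L * 2 := by ring
    omega
  rw [decodeRank_eq L _ [] hr0 hr1, List.nil_append]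
  congr 1
  have hpow : ((2 ^ L : Nat) : Int) = (2 : Int) ^ L := by push_cast; ring
  congr 1
  omega
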